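-- pv_equiv track=rewrite | github.com/sokie/kirov-server-emulator | app/db/crud.py | _rank_from_score
-- ===== SOURCE A (Python) =====
-- LEVEL_THRESHOLDS = [
--     0, 5, 13, 23, 35, 50, 67, 86, 106, 127, 150, 175, 202, 231, 262, 295, 330,
--     367, 406, 447, 490, 535, 582, 631, 682, 735, 790, 847, 906, 967, 1030, 1095,
--     1162, 1231, 1302, 1375, 1454, 1538, 1628, 1724, 1825, 1927, 2030, 2134, 2239,
--     2345, 2452, 2560, 2674, 2794, 2920, 3049, 3180, 3314, 3451, 3590, 3738, 3894,
--     4058, 4230, 4410, 4595, 4784, 4978, 5177, 5380, 5590, 5807, 6031, 6262, 6500,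
--     6744, 6993, 7247, 7506, 7770, 8044, 8328, 8622, 8926, 9240, 9562, 9890, 10224,
--     10564, 10910, 11310,
-- ]
--
-- def _rank_from_score(score: int) -> int:
--     """Return 1-based rank for a given XP score using LEVEL_THRESHOLDS."""
--     rank = 1
--     for i, threshold in enumerate(LEVEL_THRESHOLDS):
--         if score >= threshold:
--             rank = i + 1
--         else:
--             break
--     return rank
-- ===== SOURCE B (Python) =====
-- # B: stores the XP cost of each level-up (first differences of LEVEL_THRESHOLDS)
-- # and counts how many consecutive level costs the score can pay, instead of
-- # scanning cumulative thresholds with enumerate/break.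
-- _XP_PER_LEVEL = [
--     5, 8, 10, 12, 15, 17, 19, 20, 21, 23, 25, 27, 29, 31, 33, 35, 37, 39, 41,
--     43, 45, 47, 49, 51, 53, 55, 57, 59, 61, 63, 65, 67, 69, 71, 73, 79, 84, 90,
--     96, 101, 102, 103, 104, 105, 106, 107, 108, 114, 120, 126, 129, 131, 134,
--     137, 139, 148, 156, 164, 172, 180, 185, 189, 194, 199, 203, 210, 217, 224,
--     231, 238, 244, 249, 254, 259, 264, 274, 284, 294, 304, 314, 322, 328, 334,
--     340, 346, 400,
-- ]
--
-- def _rank_from_score(score: int) -> int: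
--     """Return 1-based rank for a given XP score by paying per-level XP costs."""
--     rank = 1
--     remaining = score
--     for cost in _XP_PER_LEVEL:
--         if remaining < cost:
--             break
--         remaining -= cost
--         rank += 1
--     return rank
-- ===== Notes on version B (the rewrite author's own statement) =====
-- stated objective: alternative
-- what changed: B replaces the enumerate-over-cumulative-thresholds scan (tracking an index and breaking) by a pay-as-you-go loop over a per-level XP cost table (the first differences of LEVEL_THRESHOLDS), subtracting each level's cost from the score and counting how many levels it can afford.
import Mathlib
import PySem

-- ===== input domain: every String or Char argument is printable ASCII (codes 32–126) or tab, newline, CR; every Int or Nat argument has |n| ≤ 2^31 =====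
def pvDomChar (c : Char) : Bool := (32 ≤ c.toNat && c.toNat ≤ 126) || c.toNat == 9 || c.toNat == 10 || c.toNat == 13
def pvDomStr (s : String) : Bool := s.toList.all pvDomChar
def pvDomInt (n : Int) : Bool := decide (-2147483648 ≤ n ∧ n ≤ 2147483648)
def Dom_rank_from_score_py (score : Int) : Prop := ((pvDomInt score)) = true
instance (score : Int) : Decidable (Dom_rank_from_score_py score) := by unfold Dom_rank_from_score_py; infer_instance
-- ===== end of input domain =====

-- B replaces the cumulative-threshold scan by a pay-as-you-go loop over a per-level
-- XP cost table (first differences of LEVEL_THRESHOLDS); alternative decomposition, same cost.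

-- ===== PORT A =====
def LEVEL_THRESHOLDS : List Int := [
    0, 5, 13, 23, 35, 50, 67, 86, 106, 127, 150, 175, 202, 231, 262, 295, 330,
    367, 406, 447, 490, 535, 582, 631, 682, 735, 790, 847, 906, 967, 1030, 1095,
    1162, 1231, 1302, 1375, 1454, 1538, 1628, 1724, 1825, 1927, 2030, 2134, 2239,
    2345, 2452, 2560, 2674, 2794, 2920, 3049, 3180, 3314, 3451, 3590, 3738, 3894,
    4058, 4230, 4410, 4595, 4784, 4978, 5177, 5380, 5590, 5807, 6031, 6262, 6500,
    6744, 6993, 7247, 7506, 7770, 8044, 8328, 8622, 8926, 9240, 9562, 9890, 10224,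
    10564, 10910, 11310]

-- A's loop: `for i, threshold in enumerate(...)` with `break`; state is (i, rank).
def rankLoopA (score : Int) : List Int → Int → Int → Int
  | [], _, rank => rank
  | t :: ts, i, rank => if score ≥ t then rankLoopA score ts (i + 1) (i + 1) else rank

def rank_from_score_py (score : Int) : Int :=
  rankLoopA score LEVEL_THRESHOLDS 0 1

-- ===== PORT B =====
def XP_PER_LEVEL : List Int := [
    5, 8, 10, 12, 15, 17, 19, 20, 21, 23, 25, 27, 29, 31, 33, 35, 37, 39, 41,
    43, 45, 47, 49, 51, 53, 55, 57, 59, 61, 63, 65, 67, 69, 71, 73, 79, 84, 90,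
    96, 101, 102, 103, 104, 105, 106, 107, 108, 114, 120, 126, 129, 131, 134,
    137, 139, 148, 156, 164, 172, 180, 185, 189, 194, 199, 203, 210, 217, 224,
    231, 238, 244, 249, 254, 259, 264, 274, 284, 294, 304, 314, 322, 328, 334,
    340, 346, 400]

-- B's loop: pay each level's cost while affordable; state is (remaining, rank).
def rankLoopB : List Int → Int → Int → Int
  | [], _, rank => rank
  | c :: cs, remaining, rank =>
    if remaining < c then rank else rankLoopB cs (remaining - c) (rank + 1)

def rank_from_score_py_alt (score : Int) : Int :=
  rankLoopB XP_PER_LEVEL score 1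

-- ===== PRECONDITION & SPEC =====
def Spec_rank_from_score_py (score : Int) (out : Int) : Prop := out = rank_from_score_py_alt score
instance (score : Int) (out : Int) : Decidable (Spec_rank_from_score_py score out) := by unfold Spec_rank_from_score_py; infer_instance

-- ===== CLAIM (what is proved, stated in full; the proofs are below) =====
def Claim_equal_rank_from_score_py : Prop := ∀ (score : Int), Dom_rank_from_score_py score → Spec_rank_from_score_py score (rank_from_score_py score)

-- ===== LEMMAS AND PROOFS =====

-- First differences of a list relative to a previous value.
def diffs : Int → List Int → List Int
  | _, [] => []
  | prev, x :: xs => (x - prev) :: diffs x xs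

theorem xp_eq_diffs : XP_PER_LEVEL = diffs 0 LEVEL_THRESHOLDS.tail := by decide

-- A's loop returns `rank` if no threshold is passed, else `i + (number of passed thresholds)`.
theorem rankLoopA_eq (score : Int) : ∀ (ts : List Int) (i rank : Int),
    rankLoopA score ts i rank =
      if (ts.takeWhile (fun t => decide (score ≥ t))).length = 0 then rank
      else i + (ts.takeWhile (fun t => decide (score ≥ t))).length := by
  intro ts
  induction ts with
  | nil => intro i rank; simp [rankLoopA]
  | cons t ts ih =>
    intro i rank
    by_cases h : score ≥ t
    · rw [show (t :: ts).takeWhile (fun t => decide (score ≥ t))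
          = t :: ts.takeWhile (fun t => decide (score ≥ t)) from by simp [h]]
      simp only [rankLoopA, if_pos h, ih, List.length_cons]
      split_ifs <;> first | exact ‹False›.elim | (push_cast; omega)
    · simp [rankLoopA, h]

-- B's loop on the first differences of `ts` counts the prefix of `ts` that `score` passes.
theorem rankLoopB_eq (score : Int) : ∀ (ts : List Int) (prev rank : Int),
    rankLoopB (diffs prev ts) (score - prev) rank =
      rank + (ts.takeWhile (fun t => decide (score ≥ t))).length := by
  intro ts
  induction ts with
  | nil => intro prev rank; simp [diffs, rankLoopB]
  | cons t ts ih =>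
    intro prev rank
    by_cases h : score ≥ t
    · rw [show (t :: ts).takeWhile (fun t => decide (score ≥ t))
          = t :: ts.takeWhile (fun t => decide (score ≥ t)) from by simp [h]]
      have hlt : ¬ score - prev < t - prev := by omega
      have hsub : score - prev - (t - prev) = score - t := by ring
      simp only [diffs, rankLoopB, if_neg hlt, hsub, ih, List.length_cons]
      push_cast; ring
    · have hlt : score - prev < t - prev := by omega
      rw [show (t :: ts).takeWhile (fun t => decide (score ≥ t)) = [] from by simp [h]]
      simp [diffs, rankLoopB, hlt]

theorem rank_eq (score : Int) : rank_from_score_py score = rank_from_score_py_alt score := by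
  unfold rank_from_score_py rank_from_score_py_alt
  rw [xp_eq_diffs]
  have hB := rankLoopB_eq score LEVEL_THRESHOLDS.tail 0 1
  rw [sub_zero] at hB
  rw [hB, rankLoopA_eq]
  rw [show LEVEL_THRESHOLDS = (0 : Int) :: LEVEL_THRESHOLDS.tail from rfl]
  by_cases h0 : score ≥ 0
  · rw [show ((0 : Int) :: LEVEL_THRESHOLDS.tail).takeWhile (fun t => decide (score ≥ t))
        = 0 :: LEVEL_THRESHOLDS.tail.takeWhile (fun t => decide (score ≥ t)) from by simp [h0]]
    simp only [List.length_cons, List.tail_cons]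
    split_ifs <;> first | exact ‹False›.elim | (push_cast; omega)
  · rw [show ((0 : Int) :: LEVEL_THRESHOLDS.tail).takeWhile (fun t => decide (score ≥ t))
        = [] from by simp [h0]]
    simp only [List.tail_cons]
    have : LEVEL_THRESHOLDS.tail.takeWhile (fun t => decide (score ≥ t)) = [] := by
      rw [show LEVEL_THRESHOLDS.tail.takeWhile (fun t => decide (score ≥ t))
          = [] from by simp [LEVEL_THRESHOLDS]; omega]
    simp [this]

-- ===== VERDICT (by name: the statement is the Claim_ definition above) =====
theorem rank_from_score_py_spec : Claim_equal_rank_from_score_py := by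
  intro s _
  unfold Spec_rank_from_score_py
  exact rank_eq s
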